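-- pv_equiv track=rewrite | github.com/Huch0/algorithm_community | week 20/pa03_fish.py | begin_End2
-- ===== SOURCE A (Python) =====
-- def plusArr(arr):
--     returnArr=arr.copy()
--     for i in range(len(returnArr)):
--         if returnArr[i]<0:
--             returnArr[i]=-returnArr[i]
--     return returnArr
--
-- def begin_End2(arr):
--     b=-1
--     e=-1
--     plus2=plusArr(arr)
--     for i in range(len(plus2) - 1, -1, -1):
--         if plus2[i] != i+1:
--             e=i
--             for j in range(i, -1, -1):
--                 if plus2[j] == e+1:
--                     b=j
--                     break
--             break
--
--     return b,e
-- ===== SOURCE B (Python) =====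
-- def begin_End2(arr):
--     last = {}
--     e = -1
--     for i, x in enumerate(arr):
--         v = -x if x < 0 else x
--         last[v] = i
--         if v != i + 1:
--             e = i
--     b = last.get(e + 1, -1) if e != -1 else -1
--     return b, e
-- ===== Notes on version B (the rewrite author's own statement) =====
-- stated objective: alternative
-- what changed: Replaces A's copy-then-two-backward-break-scans with a single forward pass that keeps a last-index dict per absolute value and the last mismatching index, then answers b by one dict lookup.
import Mathlib
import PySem

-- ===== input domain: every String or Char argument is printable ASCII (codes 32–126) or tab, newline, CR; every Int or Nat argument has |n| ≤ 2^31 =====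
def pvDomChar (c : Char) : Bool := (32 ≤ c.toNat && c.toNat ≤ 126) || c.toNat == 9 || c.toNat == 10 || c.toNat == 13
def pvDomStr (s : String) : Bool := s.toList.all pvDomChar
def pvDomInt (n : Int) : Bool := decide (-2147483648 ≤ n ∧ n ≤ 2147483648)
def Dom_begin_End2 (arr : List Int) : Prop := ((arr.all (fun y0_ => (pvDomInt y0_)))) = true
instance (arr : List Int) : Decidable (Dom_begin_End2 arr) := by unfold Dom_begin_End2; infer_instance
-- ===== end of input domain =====

-- B replaces A's two backward break-scans (and the abs copy) with one forward pass keeping a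
-- last-index dict per abs value and the last mismatching index; objective: alternative (single pass).

-- ===== PORT A =====
-- for-loop over a copy, negating negatives element by element (same values, same branch)
def plusArr (arr : List Int) : List Int :=
  arr.map (fun x => if x < 0 then -x else x)

-- inner backward scan: for j in range(i, -1, -1): if plus2[j] == t: return j (break); else -1.
-- fuel k = j+1; indices are always in range, so getD is exact here.
def aInner (l : List Int) (t : Int) : Nat → Int
  | 0 => -1
  | j + 1 => if l.getD j 0 = t then (j : Int) else aInner l t j

-- outer backward scan: for i in range(len-1, -1, -1): first mismatch sets e, runs the inner scan, breaks.
def aOuter (l : List Int) : Nat → Int × Int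
  | 0 => (-1, -1)
  | i + 1 =>
      if l.getD i 0 ≠ (i : Int) + 1 then (aInner l ((i : Int) + 1) (i + 1), (i : Int))
      else aOuter l i

def begin_End2 (arr : List Int) : Int × Int :=
  let plus2 := plusArr arr
  aOuter plus2 plus2.length

-- ===== PORT B =====
-- one forward pass: last[v] = i for v = abs(arr[i]); e = last index with v ≠ i+1
def bStep (st : PySem.Dict Int Int × Int) (p : Int × Int) : PySem.Dict Int Int × Int :=
  let v := if p.2 < 0 then -p.2 else p.2
  (st.1.insert v p.1, if v ≠ p.1 + 1 then p.1 else st.2)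

def begin_End2_alt (arr : List Int) : Int × Int :=
  let st := (PySem.List.enumerate arr).foldl bStep ((PySem.Dict.empty : PySem.Dict Int Int), -1)
  let e := st.2
  let b := if e ≠ -1 then st.1.getD (e + 1) (-1) else -1
  (b, e)

-- ===== PRECONDITION & SPEC =====
def Spec_begin_End2 (arr : List Int) (out : Int × Int) : Prop := out = begin_End2_alt arr
instance (arr : List Int) (out : Int × Int) : Decidable (Spec_begin_End2 arr out) := by unfold Spec_begin_End2; infer_instance

-- ===== CLAIM (what is proved, stated in full; the proofs are below) =====
def Claim_equal_begin_End2 : Prop := ∀ (arr : List Int), Dom_begin_End2 arr → Spec_begin_End2 arr (begin_End2 arr)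

-- ===== LEMMAS AND PROOFS =====

-- spec of the e-component: last index i < k with l[i] ≠ i+1, else -1
def lastBadL (l : List Int) : Nat → Int
  | 0 => -1
  | k + 1 => if l.getD k 0 ≠ (k : Int) + 1 then (k : Int) else lastBadL l k

lemma lastBadL_append (l : List Int) (v : Int) (k : Nat) (hk : k ≤ l.length) :
    lastBadL (l ++ [v]) k = lastBadL l k := by
  induction k with
  | zero => rfl
  | succ k ih =>
      simp only [lastBadL, List.getD_append l [v] 0 k (by omega), ih (by omega)]

lemma aInner_append (l : List Int) (v t : Int) (k : Nat) (hk : k ≤ l.length) :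
    aInner (l ++ [v]) t k = aInner l t k := by
  induction k with
  | zero => rfl
  | succ k ih =>
      simp only [aInner, List.getD_append l [v] 0 k (by omega), ih (by omega)]

lemma getD_concat_length (l : List Int) (v d : Int) : (l ++ [v]).getD l.length d = v := by
  simp [List.getD]

-- B's loop invariant: after the pass, the e-slot is lastBadL and the dict holds last indices per value
lemma bInv (arr : List Int) :
    ((PySem.List.enumerate arr).foldl bStep ((PySem.Dict.empty : PySem.Dict Int Int), -1)).2
      = lastBadL (plusArr arr) arr.length
    ∧ ∀ t : Int,
      ((PySem.List.enumerate arr).foldl bStep ((PySem.Dict.empty : PySem.Dict Int Int), -1)).1.getD t (-1)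
        = aInner (plusArr arr) t arr.length := by
  induction arr using List.reverseRecOn with
  | nil => exact ⟨rfl, fun t => rfl⟩
  | append_singleton xs x ih =>
      have henum : PySem.List.enumerate (xs ++ [x])
          = PySem.List.enumerate xs ++ [((xs.length : Int), x)] := by
        simp [PySem.List.enumerate_append, PySem.List.enumerate_cons, PySem.List.enumerate_nil]
      have hplus : plusArr (xs ++ [x]) = plusArr xs ++ [if x < 0 then -x else x] := by
        simp [plusArr]
      have hlen : (plusArr xs).length = xs.length := by simp [plusArr]
      have hTop : (plusArr xs ++ [if x < 0 then -x else x]).getD xs.length 0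
          = (if x < 0 then -x else x) := by
        rw [← hlen, getD_concat_length]
      constructor
      · rw [henum, List.foldl_append]
        simp only [List.foldl_cons, List.foldl_nil, bStep]
        simp only [List.length_append, List.length_singleton, lastBadL]
        rw [hplus, hTop, lastBadL_append _ _ _ (le_of_eq hlen.symm), ih.1]
      · intro t
        rw [henum, List.foldl_append]
        simp only [List.foldl_cons, List.foldl_nil, bStep]
        simp only [List.length_append, List.length_singleton, aInner]
        rw [hplus, hTop, aInner_append _ _ _ _ (le_of_eq hlen.symm)]
        rw [PySem.Dict.getD_insert, ih.2 t]
        rcases eq_or_ne t (if x < 0 then -x else x) with h | h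
        · simp [h]
        · simp [h, Ne.symm h]

-- A's outer scan, characterized through lastBadL
lemma aOuter_of_neg (l : List Int) (k : Nat) (h : lastBadL l k = -1) :
    aOuter l k = (-1, -1) := by
  induction k with
  | zero => rfl
  | succ k ih =>
      by_cases hc : l.getD k 0 ≠ (k : Int) + 1
      · exfalso; simp only [lastBadL, if_pos hc] at h; omega
      · simp only [lastBadL, if_neg hc] at h
        simp only [aOuter, if_neg hc]
        exact ih h

lemma aOuter_of_nat (l : List Int) (k m : Nat) (h : lastBadL l k = (m : Int)) :
    aOuter l k = (aInner l ((m : Int) + 1) (m + 1), (m : Int)) := by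
  induction k with
  | zero => exfalso; simp only [lastBadL] at h; omega
  | succ k ih =>
      by_cases hc : l.getD k 0 ≠ (k : Int) + 1
      · simp only [lastBadL, if_pos hc] at h
        have : m = k := by omega
        subst this
        simp only [aOuter, if_pos hc]
      · simp only [lastBadL, if_neg hc] at h
        simp only [aOuter, if_neg hc]
        exact ih h

-- where lastBadL produces an index m, every later index matches its value
lemma lastBadL_spec (l : List Int) (k : Nat) :
    lastBadL l k = -1 ∨ ∃ m : Nat, m < k ∧ lastBadL l k = (m : Int) ∧
      ∀ j : Nat, m < j → j < k → l.getD j 0 = (j : Int) + 1 := by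
  induction k with
  | zero => exact Or.inl rfl
  | succ k ih =>
      by_cases hc : l.getD k 0 ≠ (k : Int) + 1
      · refine Or.inr ⟨k, by omega, by simp only [lastBadL, if_pos hc], ?_⟩
        intro j h1 h2; omega
      · rcases ih with h | ⟨m, hm, hlb, hall⟩
        · exact Or.inl (by simp only [lastBadL, if_neg hc]; exact h)
        · refine Or.inr ⟨m, by omega, by simp only [lastBadL, if_neg hc]; exact hlb, ?_⟩
          intro j h1 h2
          by_cases hj : j = k
          · subst hj; omega
          · exact hall j h1 (by omega)

-- cutting the scan bound: no occurrence of t above m means the scan down from k equals the scan from m+1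
lemma aInner_high (l : List Int) (t : Int) (m k : Nat) (hmk : m + 1 ≤ k)
    (h : ∀ j : Nat, m < j → j < k → l.getD j 0 ≠ t) :
    aInner l t k = aInner l t (m + 1) := by
  induction k with
  | zero => omega
  | succ k ih =>
      by_cases hk : m + 1 = k + 1
      · rw [hk]
      · have hmk' : m + 1 ≤ k := by omega
        have hne : l.getD k 0 ≠ t := h k (by omega) (by omega)
        simp only [aInner, if_neg hne]
        exact ih hmk' (fun j h1 h2 => h j h1 (by omega))

-- ===== VERDICT (by name: the statement is the Claim_ definition above) =====
theorem begin_End2_spec : Claim_equal_begin_End2 := by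
  intro arr _
  show begin_End2 arr = begin_End2_alt arr
  obtain ⟨hE, hD⟩ := bInv arr
  have hlen : (plusArr arr).length = arr.length := by simp [plusArr]
  unfold begin_End2 begin_End2_alt
  simp only [hlen]
  rcases lastBadL_spec (plusArr arr) arr.length with h | ⟨m, hm, hlb, hall⟩
  · rw [aOuter_of_neg _ _ h]
    rw [h] at hE
    simp [hE]
  · rw [aOuter_of_nat _ _ m hlb]
    rw [hlb] at hE
    have hme : ((m : Int) ≠ -1) := by omega
    simp only [hE, if_pos hme, hD ((m : Int) + 1)]
    rw [aInner_high (plusArr arr) ((m : Int) + 1) m arr.length (by omega)]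
    intro j h1 h2
    rw [hall j h1 h2]
    intro hcontra
    have : j = m := by omega
    omega
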